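-- pv_equiv track=rewrite | github.com/TalusBio/talus_drc_helper | talus_drc_helper/dispenser_io.py | split_on_empty_rows
-- ===== SOURCE A (Python) =====
-- def split_on_empty_rows(nested_list):
--     """Splits a nested list on empty rows.
--
--     This is meant to be used on a nested list where every element represents a row
--     in a table. The function will split the nested list on empty rows, returning
--     a list of tables.
--     """
--     out = []
--     current = []
--     for row in nested_list:
--         if len(row) == 0:
--             out.append(current)
--             current = []
--         else:
--             if row:
--                 current.append(row)
--
--     if current:
--         out.append(current)
--
--     return out
-- ===== SOURCE B (Python) =====
-- def split_on_empty_rows(nested_list):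
--     """Recursive decomposition: peel the leading run of non-empty rows as one
--     table, then recurse on everything past the first empty row."""
--     head = []
--     rest = nested_list
--     while rest and len(rest[0]) != 0:
--         head.append(rest[0])
--         rest = rest[1:]
--     if not rest:
--         return [head] if head else []
--     return [head] + split_on_empty_rows(rest[1:])
-- ===== Notes on version B (the rewrite author's own statement) =====
-- stated objective: alternative
-- what changed: Replaces A's single accumulator loop (out/current with a trailing flush) by a recursive decomposition: peel the leading run of non-empty rows as one table, then recurse on everything past the first empty row.
import Mathlib
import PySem

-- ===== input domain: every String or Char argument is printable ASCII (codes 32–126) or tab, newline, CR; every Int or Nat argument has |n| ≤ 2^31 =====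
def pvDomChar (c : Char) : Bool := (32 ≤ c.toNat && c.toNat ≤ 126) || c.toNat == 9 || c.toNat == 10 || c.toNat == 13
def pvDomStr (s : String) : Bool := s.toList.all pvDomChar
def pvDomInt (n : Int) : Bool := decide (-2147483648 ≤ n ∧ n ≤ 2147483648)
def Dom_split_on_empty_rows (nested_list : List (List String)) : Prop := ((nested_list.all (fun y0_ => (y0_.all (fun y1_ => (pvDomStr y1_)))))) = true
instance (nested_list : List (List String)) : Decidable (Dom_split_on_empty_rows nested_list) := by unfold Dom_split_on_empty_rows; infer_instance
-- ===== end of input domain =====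

-- B replaces A's accumulator loop by a recursive decomposition (peel the leading
-- run of non-empty rows, recurse past the first empty row); objective: alternative.

-- ===== PORT A =====
-- A's loop state: (out, current); finish appends current if non-empty.
def pvStepA (s : List (List (List String)) × List (List String)) (row : List String) :
    List (List (List String)) × List (List String) :=
  if row.length = 0 then (s.1 ++ [s.2], [])
  else if row = [] then s else (s.1, s.2 ++ [row])   -- inner `if row:` of A

def split_on_empty_rows (nested_list : List (List String)) : List (List (List String)) :=
  let s := nested_list.foldl pvStepA ([], [])
  if s.2 = [] then s.1 else s.1 ++ [s.2]

-- ===== PORT B =====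
-- Source B's while loop: (head, rest) = longest non-empty-row prefix and the remainder.
def pvPeel : List (List String) → List (List String) × List (List String)
  | [] => ([], [])
  | r :: tl =>
    if r.length ≠ 0 then
      let p := pvPeel tl
      (r :: p.1, p.2)
    else ([], r :: tl)

theorem pvPeel_snd_length_le : ∀ l : List (List String), (pvPeel l).2.length ≤ l.length := by
  intro l
  induction l with
  | nil => simp [pvPeel]
  | cons r tl ih =>
    by_cases h : r.length ≠ 0 <;> simp [pvPeel, h] <;> omega

def split_on_empty_rows_alt (nested_list : List (List String)) : List (List (List String)) :=
  match h : (pvPeel nested_list).2 with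
  | [] => if (pvPeel nested_list).1 = [] then [] else [(pvPeel nested_list).1]
  | _ :: tl => (pvPeel nested_list).1 :: split_on_empty_rows_alt tl
termination_by nested_list.length
decreasing_by
  have := pvPeel_snd_length_le nested_list
  rw [h] at this
  simp at this
  omega

-- ===== PRECONDITION & SPEC =====
def Spec_split_on_empty_rows (nested_list : List (List String)) (out : List (List (List String))) : Prop := out = split_on_empty_rows_alt nested_list
instance (nested_list : List (List String)) (out : List (List (List String))) : Decidable (Spec_split_on_empty_rows nested_list out) := by unfold Spec_split_on_empty_rows; infer_instance

-- ===== CLAIM (what is proved, stated in full; the proofs are below) =====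
def Claim_equal_split_on_empty_rows : Prop := ∀ (nested_list : List (List String)), Dom_split_on_empty_rows nested_list → Spec_split_on_empty_rows nested_list (split_on_empty_rows nested_list)

-- ===== LEMMAS AND PROOFS =====

-- A's finish step.
def pvFinish (s : List (List (List String)) × List (List String)) : List (List (List String)) :=
  if s.2 = [] then s.1 else s.1 ++ [s.2]

-- The `out` component of A's fold is a pure prefix.
theorem pvFoldA_out (l : List (List String)) :
    ∀ out cur, l.foldl pvStepA (out, cur) =
      (out ++ (l.foldl pvStepA ([], cur)).1, (l.foldl pvStepA ([], cur)).2) := by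
  induction l with
  | nil => intro out cur; simp
  | cons r tl ih =>
    intro out cur
    by_cases h : r.length = 0
    · simp only [List.foldl_cons, pvStepA, h, if_true]
      simp only [List.nil_append]
      rw [ih (out ++ [cur]) [], ih [cur] []]
      simp
    · have hr : r ≠ [] := by intro e; subst e; simp at h
      simp only [List.foldl_cons, pvStepA, h, hr]
      exact ih out (cur ++ [r])

-- B's result with an extra prefix `cur` already accumulated.
def pvAltSpec (cur : List (List String)) (l : List (List String)) : List (List (List String)) :=
  match (pvPeel l).2 with
  | [] => if cur ++ (pvPeel l).1 = [] then [] else [cur ++ (pvPeel l).1]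
  | _ :: tl => (cur ++ (pvPeel l).1) :: split_on_empty_rows_alt tl

theorem pvAltSpec_nil (l : List (List String)) :
    pvAltSpec [] l = split_on_empty_rows_alt l := by
  rw [split_on_empty_rows_alt]
  unfold pvAltSpec
  cases h : (pvPeel l).2 <;> simp

theorem pvMain (l : List (List String)) :
    ∀ cur, pvFinish (l.foldl pvStepA ([], cur)) = pvAltSpec cur l := by
  induction l with
  | nil =>
    intro cur
    simp [pvFinish, pvAltSpec, pvPeel]
  | cons r tl ih =>
    intro cur
    by_cases h : r.length = 0
    · have hr : r = [] := List.eq_nil_of_length_eq_zero h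
      subst hr
      have step : pvStepA ([], cur) [] = ([cur], []) := by simp [pvStepA]
      rw [List.foldl_cons, step, pvFoldA_out tl [cur] []]
      have halt : pvAltSpec cur ([] :: tl) = cur :: split_on_empty_rows_alt tl := by
        unfold pvAltSpec
        simp [pvPeel]
      rw [halt, ← pvAltSpec_nil, ← ih []]
      unfold pvFinish
      by_cases h2 : (tl.foldl pvStepA ([], [])).2 = [] <;> simp [h2]
    · have hr : r ≠ [] := fun e => h (by simp [e])
      have step : pvStepA ([], cur) r = ([], cur ++ [r]) := by simp [pvStepA, h, hr]
      rw [List.foldl_cons, step, ih (cur ++ [r])]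
      have hp : pvPeel (r :: tl) = (r :: (pvPeel tl).1, (pvPeel tl).2) := by
        simp [pvPeel, h]
      unfold pvAltSpec
      rw [hp]
      cases h2 : (pvPeel tl).2 <;> simp

-- ===== VERDICT (by name: the statement is the Claim_ definition above) =====
theorem split_on_empty_rows_spec : Claim_equal_split_on_empty_rows := by
  intro l _
  unfold Spec_split_on_empty_rows split_on_empty_rows
  rw [← pvAltSpec_nil]
  exact pvMain l []
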